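-- pv_equiv track=rewrite | github.com/nestauk/asf_public_discourse_home_decarbonisation | asf_public_discourse_home_decarbonisation/pipeline/faqs_identification/extract_questions.py | extract_X_from_idk
-- ===== SOURCE A (Python) =====
-- from typing import List, Tuple
--
-- def extract_X_from_idk(
--     idk_phrases: List[str], inclusion_phrases: List[str]
-- ) -> List[str]:
--     """
--     Extracts and returns a list of expressions coming after the inclusion_phrases in sentences.
--     Example:
--          - idk_phrases: ["honestly I don't know what a heat pump is", "i have asked multiple people, but still don't know how what to do to install a heat pump in my home"
--          - inclusion_phrases: ["don't know how to", "don't know"]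
--          - Returns: ["what a heat pump is", "what to do to install a heat pump in my home"]
--
--     The function takes a list of inclusion_phrases and sentences mentioning at least one of the expressions in inclusion_phrases. It extracts the text following the inclusion phrase and returns a list of these extracted sentences.
--     Args:
--         idk_phrases (List[str]): A list of sentences mentioning at least one of the inclusion_phrases. Each item in the list should be a string representing a single sentence.
--         inclusion_phrases (List[str]): A list of inclusion phrases. Each item in the list should be a string representing an expression (e.g. "don't know")
--     Returns:
--         sentences_without_inclusion (List[str]):
--             - This list contains the text following the inclusion phrase.
--
--     Note:
--         - The function is case-insensitive when searching for the inclusion phrases.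
--     """
--     sentences_without_inclusion = []
--
--     idk_phrases = [phrase.lower() for phrase in idk_phrases]
--     inclusion_phrases = [phrase.lower() for phrase in inclusion_phrases]
--
--     for sentence in idk_phrases:
--         for expression in inclusion_phrases:
--             if expression in sentence:
--                 start_index = sentence.index(expression) + len(expression)
--                 extracted_text = sentence[start_index:].strip()
--                 sentences_without_inclusion.append(extracted_text)
--                 break
--     return sentences_without_inclusion
-- ===== SOURCE B (Python) =====
-- from typing import List
--
--
-- def extract_X_from_idk(
--     idk_phrases: List[str], inclusion_phrases: List[str]
-- ) -> List[str]:
--     """Phrase-major sweep: each inclusion phrase, in priority order, resolves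
--     every sentence that has no extraction yet; the sweep stops as soon as all
--     sentences are resolved, and the per-sentence results are filtered into
--     the output."""
--     sentences = [s.lower() for s in idk_phrases]
--     tails = [None] * len(sentences)
--     for phrase in [p.lower() for p in inclusion_phrases]:
--         if all(t is not None for t in tails):
--             break
--         for i, sentence in enumerate(sentences):
--             if tails[i] is None and phrase in sentence:
--                 tails[i] = sentence[sentence.index(phrase) + len(phrase):].strip()
--     return [t for t in tails if t is not None]
-- ===== Notes on version B (the rewrite author's own statement) =====
-- stated objective: alternative
-- what changed: B inverts the loop nesting: it sweeps phrase-major (each inclusion phrase, in priority order, fills in every still-unresolved sentence's extraction, stopping once all sentences are resolved) and then filters the per-sentence results, instead of A's sentence-major loop with an inner phrase scan and break.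
import Mathlib
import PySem

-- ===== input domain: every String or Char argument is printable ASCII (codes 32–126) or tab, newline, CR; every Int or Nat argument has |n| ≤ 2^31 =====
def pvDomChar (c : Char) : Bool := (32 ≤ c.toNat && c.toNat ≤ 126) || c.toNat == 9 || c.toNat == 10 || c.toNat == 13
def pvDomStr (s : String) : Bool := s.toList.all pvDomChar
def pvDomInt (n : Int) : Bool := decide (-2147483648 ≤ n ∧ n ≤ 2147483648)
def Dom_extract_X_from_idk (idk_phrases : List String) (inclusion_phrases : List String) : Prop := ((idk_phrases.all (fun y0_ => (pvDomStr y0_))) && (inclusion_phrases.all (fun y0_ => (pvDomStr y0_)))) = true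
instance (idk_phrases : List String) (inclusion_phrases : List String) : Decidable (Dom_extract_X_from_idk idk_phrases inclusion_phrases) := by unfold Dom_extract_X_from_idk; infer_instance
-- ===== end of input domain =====

-- B inverts A's loop nesting: a phrase-major sweep (each inclusion phrase, in
-- priority order, fills in the still-unresolved sentences' extractions),
-- (stopping once all sentences are resolved), followed by a filter — instead of A's sentence-major loop with an inner
-- phrase scan and break (objective: alternative traversal, same results).

-- ===== PORT A =====
-- inner `for expression in inclusion_phrases: … break`; `.index` is exact here
-- because it is guarded by `in` (no ValueError is reachable)
def aInner (sentence : String) : List String → Option String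
  | [] => none
  | expression :: rest =>
    if PySem.Str.isIn expression sentence then
      some (PySem.Str.strip (PySem.Str.slice sentence
        (some (PySem.Str.find sentence expression + PySem.Str.len expression)) none))
    else aInner sentence rest

def extract_X_from_idk (idk_phrases : List String) (inclusion_phrases : List String) : List String :=
  let idk := idk_phrases.map (fun phrase => PySem.Str.lower phrase)
  let inc := inclusion_phrases.map (fun phrase => PySem.Str.lower phrase)
  idk.foldl (fun acc sentence =>
    match aInner sentence inc with
    | some extracted_text => acc ++ [extracted_text]
    | none => acc) []

-- ===== PORT B =====
-- `tails[i] = sentence[sentence.index(phrase) + len(phrase):].strip()`;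
-- `.index` is exact since it is guarded by `phrase in sentence`
def bTail (sentence phrase : String) : String :=
  PySem.Str.strip (PySem.Str.slice sentence
    (some (PySem.Str.find sentence phrase + PySem.Str.len phrase)) none)

-- `if tails[i] is None and phrase in sentence: tails[i] = …`
def bUpd (phrase sentence : String) (tl : Option String) : Option String :=
  match tl with
  | some v => some v
  | none => if PySem.Str.isIn phrase sentence then some (bTail sentence phrase) else none

-- one phrase's pass: `if all(t is not None for t in tails): break` (the break
-- leaves tails unchanged for all later phrases, so it is ported as a
-- state-preserving skip), else `for i, sentence in enumerate(sentences): …`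
def bStep (sentences : List String) (tails : List (Option String)) (phrase : String) : List (Option String) :=
  if tails.all (fun t => t.isSome) then tails
  else List.zipWith (fun tl sentence => bUpd phrase sentence tl) tails sentences

def extract_X_from_idk_alt (idk_phrases : List String) (inclusion_phrases : List String) : List String :=
  let sentences := idk_phrases.map (fun s => PySem.Str.lower s)
  let tails := (inclusion_phrases.map (fun p => PySem.Str.lower p)).foldl
    (bStep sentences) (sentences.map (fun _ => none))
  tails.foldl (fun out t =>
    match t with
    | some v => out ++ [v]
    | none => out) []

-- ===== PRECONDITION & SPEC =====
def Spec_extract_X_from_idk (idk_phrases : List String) (inclusion_phrases : List String) (out : List String) : Prop := out = extract_X_from_idk_alt idk_phrases inclusion_phrases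
instance (idk_phrases : List String) (inclusion_phrases : List String) (out : List String) : Decidable (Spec_extract_X_from_idk idk_phrases inclusion_phrases out) := by unfold Spec_extract_X_from_idk; infer_instance

-- ===== CLAIM (what is proved, stated in full; the proofs are below) =====
def Claim_equal_extract_X_from_idk : Prop := ∀ (idk_phrases : List String) (inclusion_phrases : List String), Dom_extract_X_from_idk idk_phrases inclusion_phrases → Spec_extract_X_from_idk idk_phrases inclusion_phrases (extract_X_from_idk idk_phrases inclusion_phrases)

-- ===== LEMMAS AND PROOFS =====

-- a resolved slot is never overwritten by later phrases
theorem foldl_bUpd_some (s : String) (ps : List String) (v : String) :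
    ps.foldl (fun tl p => bUpd p s tl) (some v) = some v := by
  induction ps with
  | nil => rfl
  | cons p ps ih => exact ih

-- the per-sentence phrase sweep resolves to A's inner loop: the first phrase
-- (in list order) contained in the sentence
theorem foldl_bUpd_eq_aInner (s : String) (ps : List String) :
    ps.foldl (fun tl p => bUpd p s tl) none = aInner s ps := by
  induction ps with
  | nil => rfl
  | cons p ps ih =>
    rw [List.foldl_cons]
    by_cases h : PySem.Str.isIn p s = true
    · have h' : PySem.Chars.isIn p.toList s.toList = true := by
        rw [← PySem.Str.isIn_eq]; exact h
      have h1 : bUpd p s none = some (bTail s p) := by simp [bUpd, h']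
      rw [h1, foldl_bUpd_some]
      simp [aInner, h', bTail]
    · have h' : PySem.Chars.isIn p.toList s.toList = false := by
        rw [← PySem.Str.isIn_eq]; exact Bool.not_eq_true _ ▸ h
      have h1 : bUpd p s none = none := by simp [bUpd, h']
      rw [h1, ih]
      simp [aInner, h']

-- the zipWith update acts pointwise: the whole phrase-major sweep is a map
-- of independent per-sentence sweeps
theorem foldl_bStep_pointwise (sents : List String) (ps : List String) :
    ∀ (h : String → Option String),
      ps.foldl (bStep sents) (sents.map h)
        = sents.map (fun s => ps.foldl (fun tl p => bUpd p s tl) (h s)) := by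
  induction ps with
  | nil => intro h; rfl
  | cons p ps ih =>
    intro h
    rw [List.foldl_cons]
    have h1 : bStep sents (sents.map h) p = sents.map (fun s => bUpd p s (h s)) := by
      unfold bStep
      by_cases hall : (sents.map h).all (fun t => t.isSome) = true
      · rw [if_pos hall]
        simp only [List.all_map, List.all_eq_true] at hall
        refine List.map_congr_left (fun s hs => ?_)
        have := hall s hs
        rcases hsome : h s with _ | v
        · simp [hsome] at this
        · rfl
      · rw [if_neg hall, List.zipWith_map_left, List.zipWith_self]
    rw [h1, ih (fun s => bUpd p s (h s))]
    simp only [List.foldl_cons]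

-- ===== VERDICT (by name: the statement is the Claim_ definition above) =====
theorem extract_X_from_idk_spec : Claim_equal_extract_X_from_idk := by
  intro idk_phrases inclusion_phrases _
  unfold Spec_extract_X_from_idk
  simp only [extract_X_from_idk, extract_X_from_idk_alt]
  rw [foldl_bStep_pointwise]
  rw [List.map_congr_left (fun s _ => foldl_bUpd_eq_aInner s
    (inclusion_phrases.map (fun p => PySem.Str.lower p)))]
  simp only [List.map_map, List.foldl_map, Function.comp]
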